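-- pv_equiv track=rewrite | github.com/HHanzala261/Cloud-Media | backend/utils/security.py | validate_file_type
-- ===== SOURCE A (Python) =====
-- def validate_file_type(filename):
--     """Validate if file type is allowed for media upload"""
--     if not filename:
--         return False, "No filename provided"
--
--     # Get file extension
--     _, ext = filename.rsplit('.', 1) if '.' in filename else ('', '')
--     ext = ext.lower()
--
--     # Define allowed extensions
--     allowed_extensions = {
--         'photo': ['jpg', 'jpeg', 'png', 'gif', 'bmp', 'webp'],
--         'video': ['mp4', 'avi', 'mov', 'wmv', 'flv', 'webm', 'mkv'],
--         'audio': ['mp3', 'wav', 'flac', 'aac', 'ogg', 'm4a', 'wma']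
--     }
--
--     # Check if extension is allowed
--     for media_type, extensions in allowed_extensions.items():
--         if ext in extensions:
--             return True, media_type
--
--     return False, f"File type '{ext}' is not supported"
-- ===== SOURCE B (Python) =====
-- # Single forward pass with an accumulator extracts and lowercases the extension
-- # (resetting at each '.'), then an if-chain classifies it; no rsplit, no category loop.
-- def _media_type_of(ext):
--     if ext in ('jpg', 'jpeg', 'png', 'gif', 'bmp', 'webp'):
--         return 'photo'
--     if ext in ('mp4', 'avi', 'mov', 'wmv', 'flv', 'webm', 'mkv'):
--         return 'video'
--     if ext in ('mp3', 'wav', 'flac', 'aac', 'ogg', 'm4a', 'wma'):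
--         return 'audio'
--     return None
--
--
-- def validate_file_type(filename):
--     """Validate if file type is allowed for media upload"""
--     if not filename:
--         return False, "No filename provided"
--
--     # one pass: accumulate the lowered characters after the most recent dot
--     acc = None  # None = no dot seen yet
--     for ch in filename:
--         if ch == '.':
--             acc = []
--         elif acc is not None:
--             acc.append(ch.lower())
--     ext = ''.join(acc) if acc is not None else ''
--
--     media_type = _media_type_of(ext)
--     if media_type is not None:
--         return True, media_type
--     return False, f"File type '{ext}' is not supported"
-- ===== Notes on version B (the rewrite author's own statement) =====
-- stated objective: alternative
-- what changed: B replaces A's rsplit-then-table-scan with a single forward character pass that accumulates and lowercases the extension (resetting at each dot) and then classifies it with a direct if-chain, with no category dict and no per-category membership loop.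
import Mathlib
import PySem

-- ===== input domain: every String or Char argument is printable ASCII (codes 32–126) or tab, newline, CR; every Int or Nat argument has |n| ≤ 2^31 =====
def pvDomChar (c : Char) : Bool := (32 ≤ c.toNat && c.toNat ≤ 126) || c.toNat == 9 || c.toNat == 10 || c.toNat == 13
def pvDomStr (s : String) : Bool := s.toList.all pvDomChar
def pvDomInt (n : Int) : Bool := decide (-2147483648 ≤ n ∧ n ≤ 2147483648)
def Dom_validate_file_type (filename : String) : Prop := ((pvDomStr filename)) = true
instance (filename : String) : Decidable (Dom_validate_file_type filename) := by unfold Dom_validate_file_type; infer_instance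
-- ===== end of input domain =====

-- B replaces A's rsplit + per-category table scan by a single forward character pass with an
-- accumulator (reset at each dot, lowering as it goes) followed by a direct if-chain (objective: alternative).

-- ===== PORT A =====
-- hand port of "filename.rsplit('.', 1)[1]" when '.' is in filename: the suffix after the LAST '.'
-- (exact: rsplit('.',1) splits at the last occurrence of '.')
def pvAfterLastDot (s : String) : String :=
  String.ofList ((s.toList.reverse.takeWhile (· ≠ '.')).reverse)

def pvAllowedExtensions : List (String × List String) :=
  [("photo", ["jpg", "jpeg", "png", "gif", "bmp", "webp"]),
   ("video", ["mp4", "avi", "mov", "wmv", "flv", "webm", "mkv"]),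
   ("audio", ["mp3", "wav", "flac", "aac", "ogg", "m4a", "wma"])]

-- the 'for media_type, extensions in allowed_extensions.items(): if ext in extensions: return True, media_type' loop
def pvScan (ext : String) : List (String × List String) → Bool × String
  | [] => (false, "File type '" ++ ext ++ "' is not supported")
  | (media_type, extensions) :: rest =>
      if extensions.contains ext then (true, media_type) else pvScan ext rest

def validate_file_type (filename : String) : Bool × String :=
  if filename = "" then (false, "No filename provided")
  else
    let ext := if PySem.Str.isIn "." filename then pvAfterLastDot filename else ""
    let ext := PySem.Str.lower ext
    pvScan ext pvAllowedExtensions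

-- ===== PORT B =====
-- the loop body: 'if ch == ".": acc = []  elif acc is not None: acc.append(ch.lower())'
def pvExtStep (acc : Option (List Char)) (c : Char) : Option (List Char) :=
  if c = '.' then some []
  else
    match acc with
    | some a => some (a ++ [PySem.Chars.lowerChar c])
    | none => none

-- the if-chain classifier _media_type_of
def pvMediaTypeOf (ext : String) : Option String :=
  if ["jpg", "jpeg", "png", "gif", "bmp", "webp"].contains ext then some "photo"
  else if ["mp4", "avi", "mov", "wmv", "flv", "webm", "mkv"].contains ext then some "video"
  else if ["mp3", "wav", "flac", "aac", "ogg", "m4a", "wma"].contains ext then some "audio"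
  else none

def validate_file_type_alt (filename : String) : Bool × String :=
  if filename = "" then (false, "No filename provided")
  else
    let acc := filename.toList.foldl pvExtStep none
    let ext := match acc with | some a => String.ofList a | none => ""
    match pvMediaTypeOf ext with
    | some media_type => (true, media_type)
    | none => (false, "File type '" ++ ext ++ "' is not supported")

-- ===== PRECONDITION & SPEC =====
def Spec_validate_file_type (filename : String) (out : Bool × String) : Prop := out = validate_file_type_alt filename
instance (filename : String) (out : Bool × String) : Decidable (Spec_validate_file_type filename out) := by unfold Spec_validate_file_type; infer_instance

-- ===== CLAIM (what is proved, stated in full; the proofs are below) =====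
def Claim_equal_validate_file_type : Prop := ∀ (filename : String), Dom_validate_file_type filename → Spec_validate_file_type filename (validate_file_type filename)

-- ===== LEMMAS AND PROOFS =====

-- B's single pass computes: if a dot occurs, the lowered suffix after the last dot, else nothing
theorem pvExtFold_eq (l : List Char) :
    l.foldl pvExtStep none =
      if '.' ∈ l then some (((l.reverse.takeWhile (· ≠ '.')).reverse).map PySem.Chars.lowerChar)
      else none := by
  induction l using List.reverseRecOn with
  | nil => simp
  | append_singleton l c ih =>
      rw [List.foldl_append, List.foldl_cons, List.foldl_nil, ih]
      by_cases hc : c = '.'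
      · subst hc; simp [pvExtStep]
      · by_cases hd : '.' ∈ l
        · simp [pvExtStep, hc, hd, Ne.symm hc]
        · simp [pvExtStep, hc, hd]
          exact fun h => hc h.symm

-- the two classifiers agree for every extension string
theorem pvScan_eq_mediaTypeOf (ext : String) :
    pvScan ext pvAllowedExtensions =
      (match pvMediaTypeOf ext with
       | some media_type => (true, media_type)
       | none => (false, "File type '" ++ ext ++ "' is not supported")) := by
  unfold pvScan pvAllowedExtensions pvMediaTypeOf
  split_ifs <;> simp_all [pvScan]

-- ===== VERDICT (by name: the statement is the Claim_ definition above) =====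
theorem validate_file_type_spec : Claim_equal_validate_file_type := by
  intro filename _
  unfold Spec_validate_file_type validate_file_type validate_file_type_alt
  by_cases h : filename = ""
  · simp [h]
  · simp only [h, if_false]
    rw [pvExtFold_eq]
    have hiff : PySem.Str.isIn "." filename = true ↔ '.' ∈ filename.toList := by
      rw [PySem.Str.isIn_iff_infix]
      constructor
      · intro hinf
        exact hinf.sublist.mem (List.mem_singleton.mpr rfl)
      · intro hm
        obtain ⟨s, t, hst⟩ := List.append_of_mem hm
        exact ⟨s, t, by rw [hst]; simp⟩
    by_cases hd : '.' ∈ filename.toList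
    · simp only [hd, if_pos, hiff.mpr hd]
      rw [pvScan_eq_mediaTypeOf]
      have hext : PySem.Str.lower (pvAfterLastDot filename) =
          String.ofList (((filename.toList.reverse.takeWhile (· ≠ '.')).reverse).map PySem.Chars.lowerChar) := by
        apply String.toList_injective
        simp [pvAfterLastDot, PySem.Str.toList_lower, PySem.Chars.lower]
      rw [hext]
    · have hfalse : PySem.Str.isIn "." filename = false := by
        cases hb : PySem.Str.isIn "." filename
        · rfl
        · exact absurd (hiff.mp hb) hd
      simp only [hd, hfalse, Bool.false_eq_true, if_false]
      rw [pvScan_eq_mediaTypeOf]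
      rfl
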